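-- pv_equiv track=rewrite | github.com/cluejws/codingTest | pog/L3/L3_258709_binarySearch.py | getWinCount
-- ===== SOURCE A (Python) =====
-- def getWinCount(a_dict, b_dict):
--     # 계산1: 정렬
--     a_items = list(a_dict.items())
--     a_items.sort()
--     b_items = list(b_dict.items())
--     b_items.sort()
--
--     # 계산2: a 순회(이진탐색)
--     win_cnt = 0
--     for a_value, a_cnt in a_items:
--
--         # 2-1: 이진탐색(해당 숫자 미만인 가장 큰 숫자)
--         n = len(b_items)
--
--         max_idx = -1
--         left, right = 0, n-1
--         while left <= right:
--             mid = (left + right) // 2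
--             b_value, b_cnt = b_items[mid]
--             if b_value < a_value:
--                 max_idx = max(max_idx, mid)
--                 left = mid + 1
--             else:
--                 right = mid - 1
--
--         # 2-2: 이진탐색 반영
--         b_value, b_cnt = b_items[0]
--         if a_value < b_value:
--             win_cnt += (0 * b_cnt)
--         else:
--             for idx in range(max_idx+1):
--                 b_value, b_cnt = b_items[idx]
--                 win_cnt += (a_cnt * b_cnt)
--
--     return win_cnt
-- ===== SOURCE B (Python) =====
-- def getWinCount(a_dict, b_dict):
--     # Sort both sides once; sweep a in ascending order with a single pointer into b,
--     # maintaining the running sum of b-counts below the current a value.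
--     a_items = sorted(a_dict.items())
--     b_items = sorted(b_dict.items())
--     win = 0
--     s = 0
--     j = 0
--     m = len(b_items)
--     for a_value, a_cnt in a_items:
--         while j < m and b_items[j][0] < a_value:
--             s += b_items[j][1]
--             j += 1
--         win += a_cnt * s
--     return win
-- ===== Notes on version B (the rewrite author's own statement) =====
-- stated objective: faster
-- what changed: A binary-searches b_items for every a item and then re-sums a prefix of b counts from scratch; B sorts both sides once and does a single merge-style sweep with one pointer into b and a running prefix sum, so the per-a binary search and the repeated prefix summation disappear.
-- crash fix: When b_dict is empty and a_dict is not, A raises IndexError on b_items[0]; B returns 0 (no b element is below any a value). — e.g. on getWinCount([(1, 2)], []): A raises IndexError, B returns 0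
import Mathlib
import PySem

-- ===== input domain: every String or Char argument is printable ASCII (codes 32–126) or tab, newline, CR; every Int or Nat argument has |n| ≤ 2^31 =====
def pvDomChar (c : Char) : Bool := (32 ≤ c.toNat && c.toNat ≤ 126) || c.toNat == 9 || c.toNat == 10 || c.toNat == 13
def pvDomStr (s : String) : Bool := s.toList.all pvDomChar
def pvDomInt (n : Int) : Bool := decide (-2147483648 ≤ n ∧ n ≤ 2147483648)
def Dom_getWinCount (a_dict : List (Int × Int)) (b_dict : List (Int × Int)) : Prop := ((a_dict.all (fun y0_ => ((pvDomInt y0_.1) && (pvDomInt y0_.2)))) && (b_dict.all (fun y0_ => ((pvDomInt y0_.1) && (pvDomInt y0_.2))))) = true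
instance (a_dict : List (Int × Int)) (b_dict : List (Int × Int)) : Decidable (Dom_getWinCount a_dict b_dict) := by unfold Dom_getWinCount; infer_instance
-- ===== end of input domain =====

-- B replaces A's per-a-item binary search + prefix re-summation by a single sorted
-- merge-style sweep with a running prefix sum (objective: faster).

-- ===== PORT A =====
-- A's 'while left <= right' binary-search loop; b_items[mid] is in range on every call
-- A makes, so the '.getD (0, 0)' default is never consulted on admitted inputs.
def bsLoop (bs : List (Int × Int)) (aVal maxIdx left right : Int) : Int :=
  if h : left ≤ right then
    let mid := PySem.Int.floordiv (left + right) 2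
    let b := PySem.List.pyGetD bs mid (0, 0)
    if b.1 < aVal then bsLoop bs aVal (max maxIdx mid) (mid + 1) right
    else bsLoop bs aVal maxIdx left (mid - 1)
  else maxIdx
termination_by (right + 1 - left).toNat
decreasing_by
  · have hb := PySem.Int.floordiv_two_mid_bounds h
    omega
  · have hb := PySem.Int.floordiv_two_mid_bounds h
    omega

def getWinCount (a_dict : List (Int × Int)) (b_dict : List (Int × Int)) : Int :=
  let a_items := PySem.List.sorted2 (PySem.Dict.ofList a_dict).items Prod.fst Prod.snd
  let b_items := PySem.List.sorted2 (PySem.Dict.ofList b_dict).items Prod.fst Prod.snd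
  a_items.foldl (fun win_cnt p =>
    let n : Int := b_items.length
    let max_idx := bsLoop b_items p.1 (-1) 0 (n - 1)
    -- b_items[0]: IndexError when b_items = [] — those inputs are outside Pre_getWinCount
    let b0 := PySem.List.pyGetD b_items 0 (0, 0)
    if p.1 < b0.1 then win_cnt + 0 * b0.2
    else (PySem.List.pyRange 0 (max_idx + 1)).foldl
      (fun w idx => w + p.2 * (PySem.List.pyGetD b_items idx (0, 0)).2) win_cnt) 0

-- ===== PORT B =====
-- B's inner 'while j < m and b_items[j][0] < a_value' loop: consumes the not-yet-passed
-- suffix of the sorted b items, accumulating the running sum s of their counts.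
def bAdvance (bs : List (Int × Int)) (aVal s : Int) : List (Int × Int) × Int :=
  match bs with
  | [] => ([], s)
  | b :: t => if b.1 < aVal then bAdvance t aVal (s + b.2) else (b :: t, s)

-- B's outer 'for a_value, a_cnt in a_items' loop.
def bOuter (aRest bRest : List (Int × Int)) (s win : Int) : Int :=
  match aRest with
  | [] => win
  | p :: t =>
    let r := bAdvance bRest p.1 s
    bOuter t r.1 r.2 (win + p.2 * r.2)

def getWinCount_alt (a_dict : List (Int × Int)) (b_dict : List (Int × Int)) : Int :=
  bOuter (PySem.List.sorted2 (PySem.Dict.ofList a_dict).items Prod.fst Prod.snd)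
         (PySem.List.sorted2 (PySem.Dict.ofList b_dict).items Prod.fst Prod.snd) 0 0

-- ===== PRECONDITION & SPEC =====
-- A evaluates b_items[0] whenever a_dict is nonempty: IndexError (no return) when
-- b_dict = [] and a_dict ≠ []; exactly those inputs are excluded.
def Pre_getWinCount (a_dict : List (Int × Int)) (b_dict : List (Int × Int)) : Prop :=
  a_dict = [] ∨ b_dict ≠ []
instance (a_dict : List (Int × Int)) (b_dict : List (Int × Int)) : Decidable (Pre_getWinCount a_dict b_dict) := by unfold Pre_getWinCount; infer_instance

def pvWitness_getWinCount : (List (Int × Int)) × (List (Int × Int)) :=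
  ([(1, 2), (3, 1)], [(0, 5), (2, 1)])

-- When b_dict is empty and a_dict is not, A raises IndexError on b_items[0]; B returns 0
-- (no b element is below any a value).
def Raises_getWinCount (a_dict : List (Int × Int)) (b_dict : List (Int × Int)) : Prop :=
  a_dict ≠ [] ∧ b_dict = []
instance (a_dict : List (Int × Int)) (b_dict : List (Int × Int)) : Decidable (Raises_getWinCount a_dict b_dict) := by unfold Raises_getWinCount; infer_instance

def pvRaiseWitness_getWinCount : (List (Int × Int)) × (List (Int × Int)) := ([(1, 2)], [])
def pvRaiseWitnessOut_getWinCount : Int := 0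

def Spec_getWinCount (a_dict : List (Int × Int)) (b_dict : List (Int × Int)) (out : Int) : Prop := out = getWinCount_alt a_dict b_dict
instance (a_dict : List (Int × Int)) (b_dict : List (Int × Int)) (out : Int) : Decidable (Spec_getWinCount a_dict b_dict out) := by unfold Spec_getWinCount; infer_instance

-- ===== CLAIM (what is proved, stated in full; the proofs are below) =====
def Claim_equal_getWinCount : Prop := ∀ (a_dict : List (Int × Int)) (b_dict : List (Int × Int)), Dom_getWinCount a_dict b_dict → Pre_getWinCount a_dict b_dict → Spec_getWinCount a_dict b_dict (getWinCount a_dict b_dict)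

def Claim_raises_getWinCount : Prop := (∀ (a_dict : List (Int × Int)) (b_dict : List (Int × Int)), Dom_getWinCount a_dict b_dict → Raises_getWinCount a_dict b_dict → ¬ Pre_getWinCount a_dict b_dict) ∧ (Dom_getWinCount (pvRaiseWitness_getWinCount.1) (pvRaiseWitness_getWinCount.2) ∧ Raises_getWinCount (pvRaiseWitness_getWinCount.1) (pvRaiseWitness_getWinCount.2) ∧ getWinCount_alt (pvRaiseWitness_getWinCount.1) (pvRaiseWitness_getWinCount.2) = pvRaiseWitnessOut_getWinCount)

-- ===== LEMMAS AND PROOFS =====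

-- sum of the b-counts strictly below a, over the sorted prefix
def bsum (bs : List (Int × Int)) (a : Int) : Int :=
  ((bs.takeWhile (fun q => decide (q.1 < a))).map Prod.snd).sum

lemma insertBy_congr (f g : Int × Int → Int × Int → Bool) (x : Int × Int) :
    ∀ acc : List (Int × Int), (∀ y ∈ acc, f x y = g x y) →
      PySem.List.insertBy f x acc = PySem.List.insertBy g x acc := by
  intro acc
  induction acc with
  | nil => intro _; rfl
  | cons y ys ih =>
    intro h
    have hy : f x y = g x y := h y (by simp)
    simp only [PySem.List.insertBy, hy]
    by_cases hg : g x y = true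
    · simp [hg]
    · simp only [Bool.not_eq_true] at hg
      simp [hg]
      exact ih (fun z hz => h z (by simp [hz]))

lemma foldl_insertBy_congr (f g : Int × Int → Int × Int → Bool) :
    ∀ (xs acc : List (Int × Int)),
      (∀ x ∈ xs, ∀ y : Int × Int, (y ∈ acc ∨ y ∈ xs) → f x y = g x y) →
      xs.foldl (fun acc x => PySem.List.insertBy f x acc) acc
        = xs.foldl (fun acc x => PySem.List.insertBy g x acc) acc := by
  intro xs
  induction xs with
  | nil => intro acc _; rfl
  | cons x t ih =>
    intro acc h
    simp only [List.foldl_cons]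
    rw [insertBy_congr f g x acc (fun y hy => h x (by simp) y (Or.inl hy))]
    apply ih
    intro z hz y hy
    apply h z (by simp [hz])
    rcases hy with hy | hy
    · rw [PySem.List.insertBy_mem_iff] at hy
      rcases hy with hy | hy
      · exact Or.inr (by simp [hy])
      · exact Or.inl hy
    · exact Or.inr (by simp [hy])

lemma sorted2_eq_sorted (xs : List (Int × Int)) (h : (xs.map Prod.fst).Nodup) :
    PySem.List.sorted2 xs Prod.fst Prod.snd = PySem.List.sorted xs Prod.fst := by
  have hinj := List.inj_on_of_nodup_map h
  rw [PySem.List.sorted_eq_foldl_insertBy]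
  show xs.foldl (fun acc x => PySem.List.insertBy
      (fun a b => decide (a.1 < b.1) || (!decide (b.1 < a.1) && decide (a.2 < b.2))) x acc) []
    = xs.foldl (fun acc x => PySem.List.insertBy (fun a b => decide (a.1 < b.1)) x acc) []
  apply foldl_insertBy_congr
  intro x hx y hy
  rcases hy with hy | hy
  · simp at hy
  · rcases lt_trichotomy x.1 y.1 with hlt | heq | hgt
    · simp [hlt, not_lt_of_gt hlt]
    · have : x = y := hinj hx hy heq
      subst this
      simp
    · simp [hgt, not_lt_of_gt hgt]

lemma key_lt_iff (bs : List (Int × Int)) (a : Int)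
    (hs : bs.Pairwise (fun p q => p.1 ≤ q.1)) :
    ∀ (i : Nat) (hi : i < bs.length),
      (bs[i].1 < a ↔ i < (bs.takeWhile (fun q => decide (q.1 < a))).length) := by
  induction bs with
  | nil => intro i hi; simp at hi
  | cons b t ih =>
    rw [List.pairwise_cons] at hs
    intro i hi
    cases i with
    | zero => by_cases hb : b.1 < a <;> simp [List.takeWhile_cons, hb]
    | succ j =>
      by_cases hb : b.1 < a
      · simp only [List.takeWhile_cons, hb, decide_true, if_true, List.getElem_cons_succ,
          List.length_cons]
        have hj : j < t.length := by simpa using hi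
        simpa using ih hs.2 j hj
      · have hle : a ≤ b.1 := not_lt.1 hb
        have hj : j < t.length := by simpa using hi
        have : a ≤ t[j].1 := le_trans hle (hs.1 t[j] (List.getElem_mem hj))
        simp [List.takeWhile_cons, hb, not_lt.2 this]

lemma bsLoop_correct (bs : List (Int × Int)) (a : Int)
    (hs : bs.Pairwise (fun p q => p.1 ≤ q.1)) :
    ∀ (n : Nat) (left right : Int), (right + 1 - left).toNat ≤ n →
      0 ≤ left → right < (bs.length : Int) →
      left ≤ ((bs.takeWhile (fun q => decide (q.1 < a))).length : Int) →
      ((bs.takeWhile (fun q => decide (q.1 < a))).length : Int) ≤ right + 1 →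
      bsLoop bs a (left - 1) left right
        = ((bs.takeWhile (fun q => decide (q.1 < a))).length : Int) - 1 := by
  intro n
  induction n with
  | zero =>
    intro left right hn h0 hr hK1 hK2
    rw [bsLoop]
    have hlr : ¬ left ≤ right := by omega
    rw [dif_neg hlr]
    omega
  | succ m ih =>
    intro left right hn h0 hr hK1 hK2
    rw [bsLoop]
    by_cases hlr : left ≤ right
    · rw [dif_pos hlr]
      have hmid := PySem.Int.floordiv_two_mid_bounds hlr
      set mid := PySem.Int.floordiv (left + right) 2 with hmiddef
      have hmid0 : 0 ≤ mid := le_trans h0 hmid.1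
      have hmidlt : mid < (bs.length : Int) := lt_of_le_of_lt hmid.2 hr
      have hget : PySem.List.pyGetD bs mid (0, 0) = bs[mid.toNat] :=
        PySem.List.pyGetD_eq_getElem bs (0, 0) hmid0 hmidlt
      have hmn : mid.toNat < bs.length := by omega
      have hiff := key_lt_iff bs a hs mid.toNat hmn
      by_cases hb : (PySem.List.pyGetD bs mid (0, 0)).1 < a
      · rw [if_pos hb]
        have hmidK : (mid.toNat : Int)
            < ((bs.takeWhile (fun q => decide (q.1 < a))).length : Int) := by
          rw [hget] at hb
          have := (hiff.1 hb)
          omega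
        have hmax : max (left - 1) mid = (mid + 1) - 1 := by omega
        rw [hmax]
        exact ih (mid + 1) right (by omega) (by omega) hr (by omega) hK2
      · rw [if_neg hb]
        have hKmid : ((bs.takeWhile (fun q => decide (q.1 < a))).length : Int)
            ≤ (mid.toNat : Int) := by
          rw [hget] at hb
          by_contra hcon
          exact hb (hiff.2 (by omega))
        exact ih left (mid - 1) (by omega) h0 (by omega) hK1 (by omega)
    · rw [dif_neg hlr]
      omega

lemma range_map_take (xs : List (Int × Int)) (d : Int × Int) :
    ∀ (k : Nat), k ≤ xs.length →
      (PySem.List.pyRange 0 (k : Int)).map (fun i => PySem.List.pyGetD xs i d)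
        = xs.take k := by
  intro k
  induction k with
  | zero => intro _; rfl
  | succ j ih =>
    intro hk
    have hrange : PySem.List.pyRange 0 ((j + 1 : Nat) : Int)
        = PySem.List.pyRange 0 (j : Nat) ++ [(j : Int)] := by
      have := PySem.List.pyRange_one_succ_right (a := 0) (b := (j : Int)) (by omega)
      simpa [Int.natCast_succ, add_comm] using this
    rw [hrange, List.map_append, ih (by omega)]
    have hj : j < xs.length := by omega
    have hget : PySem.List.pyGetD xs (j : Int) d = xs[j] :=
      PySem.List.pyGetD_eq_getElem xs d (by omega) (by exact_mod_cast hj)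
    rw [List.take_add_one, List.getElem?_eq_getElem hj]
    simp [hget]

lemma innerA (T : List (Int × Int)) (hT : T ≠ [])
    (hs : T.Pairwise (fun p q => p.1 ≤ q.1)) (a c w : Int) :
    (if a < (PySem.List.pyGetD T 0 (0, 0)).1 then
        w + 0 * (PySem.List.pyGetD T 0 (0, 0)).2
      else (PySem.List.pyRange 0 (bsLoop T a (-1) 0 ((T.length : Int) - 1) + 1)).foldl
        (fun w' idx => w' + c * (PySem.List.pyGetD T idx (0, 0)).2) w)
    = w + c * bsum T a := by
  have hlen : 0 < T.length := List.length_pos_iff.2 hT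
  have hKle : (T.takeWhile (fun q => decide (q.1 < a))).length ≤ T.length :=
    (List.takeWhile_prefix _).length_le
  have hneg : (-1 : Int) = 0 - 1 := by norm_num
  have hloop : bsLoop T a (-1) 0 ((T.length : Int) - 1)
      = ((T.takeWhile (fun q => decide (q.1 < a))).length : Int) - 1 := by
    rw [hneg]
    exact bsLoop_correct T a hs T.length 0 ((T.length : Int) - 1) (by omega) (by omega)
      (by omega) (by omega) (by omega)
  by_cases hb : a < (PySem.List.pyGetD T 0 (0, 0)).1
  · rw [if_pos hb]
    obtain ⟨t0, rest, rfl⟩ := List.exists_cons_of_ne_nil hT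
    have hget : PySem.List.pyGetD (t0 :: rest) 0 (0, 0) = t0 := by
      rw [PySem.List.pyGetD_eq_getElem (t0 :: rest) (0, 0) (by omega) (by simp)]
      rfl
    rw [hget] at hb
    have : bsum (t0 :: rest) a = 0 := by
      simp [bsum, List.takeWhile_cons, not_lt.2 (le_of_lt hb)]
    rw [this]
    ring
  · rw [if_neg hb]
    rw [hloop]
    have hK1 : ((T.takeWhile (fun q => decide (q.1 < a))).length : Int) - 1 + 1
        = ((T.takeWhile (fun q => decide (q.1 < a))).length : Int) := by omega
    rw [hK1]
    rw [PySem.List.foldl_add _ (fun idx => c * (PySem.List.pyGetD T idx (0, 0)).2)]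
    have hmap : (PySem.List.pyRange 0
          ((T.takeWhile (fun q => decide (q.1 < a))).length : Int)).map
          (fun idx => (PySem.List.pyGetD T idx (0, 0)).2)
        = (T.takeWhile (fun q => decide (q.1 < a))).map Prod.snd := by
      have h1 := range_map_take T (0, 0)
        (T.takeWhile (fun q => decide (q.1 < a))).length hKle
      have h2 : T.take (T.takeWhile (fun q => decide (q.1 < a))).length
          = T.takeWhile (fun q => decide (q.1 < a)) :=
        (List.prefix_iff_eq_take.1 (List.takeWhile_prefix _)).symm
      calc (PySem.List.pyRange 0
            ((T.takeWhile (fun q => decide (q.1 < a))).length : Int)).map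
            (fun idx => (PySem.List.pyGetD T idx (0, 0)).2)
          = ((PySem.List.pyRange 0
              ((T.takeWhile (fun q => decide (q.1 < a))).length : Int)).map
              (fun i => PySem.List.pyGetD T i (0, 0))).map Prod.snd := by
            rw [List.map_map]; rfl
        _ = (T.takeWhile (fun q => decide (q.1 < a))).map Prod.snd := by rw [h1, h2]
    calc w + ((PySem.List.pyRange 0
          ((T.takeWhile (fun q => decide (q.1 < a))).length : Int)).map
          (fun idx => c * (PySem.List.pyGetD T idx (0, 0)).2)).sum
        = w + c * ((PySem.List.pyRange 0
            ((T.takeWhile (fun q => decide (q.1 < a))).length : Int)).map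
            (fun idx => (PySem.List.pyGetD T idx (0, 0)).2)).sum := by
          rw [List.sum_map_mul_left]
      _ = w + c * bsum T a := by rw [hmap]; rfl

lemma bAdvance_eq (a : Int) :
    ∀ (bs : List (Int × Int)) (s : Int),
      bAdvance bs a s = (bs.dropWhile (fun q => decide (q.1 < a)), s + bsum bs a) := by
  intro bs
  induction bs with
  | nil => intro s; simp [bAdvance, bsum]
  | cons b t ih =>
    intro s
    by_cases hb : b.1 < a
    · simp [bAdvance, hb, List.dropWhile_cons, ih, bsum, List.takeWhile_cons]
      ring
    · simp [bAdvance, hb, List.dropWhile_cons, bsum, List.takeWhile_cons]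

lemma bsum_split (v w : Int) (hvw : v ≤ w) :
    ∀ bs : List (Int × Int),
      bsum bs v + bsum (bs.dropWhile (fun q => decide (q.1 < v))) w = bsum bs w := by
  intro bs
  induction bs with
  | nil => simp [bsum]
  | cons b t ih =>
    by_cases hb : b.1 < v
    · have hbw : b.1 < w := lt_of_lt_of_le hb hvw
      simp [bsum, hb, hbw] at *
      omega
    · simp [bsum, hb] at *

lemma bOuter_eq :
    ∀ (S bs : List (Int × Int)) (s win : Int),
      S.Pairwise (fun p q => p.1 ≤ q.1) →
      bOuter S bs s win = win + (S.map (fun p => p.2 * (s + bsum bs p.1))).sum := by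
  intro S
  induction S with
  | nil => intro bs s win _; simp [bOuter]
  | cons p t ih =>
    intro bs s win hs
    rw [List.pairwise_cons] at hs
    simp only [bOuter, bAdvance_eq]
    rw [ih _ _ _ hs.2]
    have hcong : t.map (fun q => q.2 * ((s + bsum bs p.1)
          + bsum (bs.dropWhile (fun r => decide (r.1 < p.1))) q.1))
        = t.map (fun q => q.2 * (s + bsum bs q.1)) := by
      apply List.map_congr_left
      intro q hq
      rw [add_assoc, bsum_split p.1 q.1 (hs.1 q hq) bs]
    rw [hcong]
    simp only [List.map_cons, List.sum_cons]
    ring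

lemma items_ne_nil (b_dict : List (Int × Int)) (hb : b_dict ≠ []) :
    (PySem.Dict.ofList b_dict).items ≠ [] := by
  obtain ⟨q, rest, rfl⟩ := List.exists_cons_of_ne_nil hb
  intro hnil
  have hk : (PySem.Dict.ofList (q :: rest)).keys
      = PySem.Set.update ([] : List Int) ((q :: rest).map Prod.fst) :=
    PySem.Dict.keys_foldl_insert_key (q :: rest) Prod.fst (fun _ x => x.2) PySem.Dict.empty
  have hupd : PySem.Set.update ([] : List Int) ((q :: rest).map Prod.fst)
      = PySem.Set.ofList ((q :: rest).map Prod.fst) := by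
    rw [PySem.Set.ofList_eq_foldl]; rfl
  have hmem : q.1 ∈ (PySem.Dict.ofList (q :: rest)).keys := by
    rw [hk, hupd, PySem.Set.mem_ofList]; simp
  have hkeys : (PySem.Dict.ofList (q :: rest)).keys
      = (PySem.Dict.ofList (q :: rest)).items.map Prod.fst := rfl
  rw [hkeys, hnil] at hmem
  simp at hmem

theorem getWinCount_spec : Claim_equal_getWinCount := by
  intro a_dict b_dict _ hpre
  unfold Spec_getWinCount
  have hnda : ((PySem.Dict.ofList a_dict).items.map Prod.fst).Nodup :=
    PySem.Dict.nodup_keys_ofList a_dict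
  have hndb : ((PySem.Dict.ofList b_dict).items.map Prod.fst).Nodup :=
    PySem.Dict.nodup_keys_ofList b_dict
  rw [getWinCount, getWinCount_alt, sorted2_eq_sorted _ hnda, sorted2_eq_sorted _ hndb]
  set S := PySem.List.sorted (PySem.Dict.ofList a_dict).items Prod.fst with hSdef
  set T := PySem.List.sorted (PySem.Dict.ofList b_dict).items Prod.fst with hTdef
  have hSp : S.Pairwise (fun p q => p.1 ≤ q.1) := PySem.List.sorted_pairwise _ _
  have hTp : T.Pairwise (fun p q => p.1 ≤ q.1) := PySem.List.sorted_pairwise _ _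
  rcases hpre with ha | hb
  · subst ha
    rfl
  · have hT : T ≠ [] := by
      rw [hTdef, Ne, PySem.List.sorted_eq_nil_iff]
      exact items_ne_nil b_dict hb
    rw [bOuter_eq S T 0 0 hSp]
    rw [PySem.List.foldl_congr_mem S _ (fun w p => w + p.2 * bsum T p.1) 0
      (fun acc p _ => innerA T hT hTp p.1 p.2 acc)]
    rw [PySem.List.foldl_add S (fun p : Int × Int => p.2 * bsum T p.1) 0]
    simp

@[simp] theorem getWinCount_raises : Claim_raises_getWinCount := by
  unfold Claim_raises_getWinCount
  constructor
  · intro a_dict b_dict _ hr hp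
    rcases hp with hp | hp
    · exact hr.1 hp
    · exact hp hr.2
  · exact ⟨by decide, by decide, by decide⟩
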